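-- pv_equiv track=rewrite | github.com/Na1an/Algorithme_trie | tp2_ex2.py | calcule_ops
-- ===== SOURCE A (Python) =====
-- def calcule_ops(n) :
--   ret = 0
--   res = 0
--
--   if n == 1:
--     return 0,0
--   elif n == 2:
--     return 1,1
--   elif n%2 == 0 :
--     ret,res = calcule_ops(n//2)
--     res += 1
--     ret += 1
--     return  ret,res
--   else :
--     ret,res = calcule_ops(n-1)
--     ret += 1
--
--     return ret,res
-- ===== SOURCE B (Python) =====
-- def calcule_ops(n):
--     res = n.bit_length() - 1
--     ret = res + bin(n).count('1') - 1
--     return ret, res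
-- ===== Notes on version B (the rewrite author's own statement) =====
-- stated objective: faster
-- what changed: Replaced the halving/decrement recursion by a closed form: res = n.bit_length()-1 (floor log2) and ret = res + popcount(n) - 1, no recursion at all.
import Mathlib
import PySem

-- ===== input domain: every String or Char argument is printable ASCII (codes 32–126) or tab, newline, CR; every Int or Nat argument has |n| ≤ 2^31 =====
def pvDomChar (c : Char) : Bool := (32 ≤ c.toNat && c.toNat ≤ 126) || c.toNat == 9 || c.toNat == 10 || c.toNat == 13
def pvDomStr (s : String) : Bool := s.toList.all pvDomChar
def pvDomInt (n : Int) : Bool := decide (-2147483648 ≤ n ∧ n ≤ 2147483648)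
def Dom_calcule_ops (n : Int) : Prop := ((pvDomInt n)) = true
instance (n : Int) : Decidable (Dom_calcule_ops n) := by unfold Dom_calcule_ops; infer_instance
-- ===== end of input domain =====

-- B replaces A's halving/decrement recursion by the closed form (bit_length - 1, + popcount - 1): faster, no recursion.
-- Pre_ excludes n ≤ 0, where the Python A recurses forever (RecursionError).


-- ===== PORT A =====
-- literal port of A's recursion; the `n ≤ 0` guard only totalizes the function
-- (Python diverges there; those inputs are outside Pre_calcule_ops).
def calcule_ops (n : Int) : Int × Int :=
  if n = 1 then (0, 0)
  else if n = 2 then (1, 1)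
  else if n ≤ 0 then (0, 0)
  else if n % 2 = 0 then
    let p := calcule_ops (n / 2)
    (p.1 + 1, p.2 + 1)
  else
    let p := calcule_ops (n - 1)
    (p.1 + 1, p.2)
termination_by n.toNat
decreasing_by all_goals omega

-- ===== PORT B =====
-- popcount of m, as bin(n).count('1') counts the binary digits of |n|
def pvPopcount : Nat → Nat
  | 0 => 0
  | m + 1 => (m + 1) % 2 + pvPopcount ((m + 1) / 2)
decreasing_by omega

-- Python's n.bit_length() (on |n|)
def pvBitLength (m : Nat) : Nat := if m = 0 then 0 else Nat.log2 m + 1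

def calcule_ops_alt (n : Int) : Int × Int :=
  let res : Int := (pvBitLength n.natAbs : Int) - 1
  let ret : Int := res + (pvPopcount n.natAbs : Int) - 1
  (ret, res)

-- ===== PRECONDITION & SPEC =====
-- Pre_ excludes exactly n ≤ 0, where Python's A recurses forever (RecursionError).
def Pre_calcule_ops (n : Int) : Prop := 1 ≤ n
instance (n : Int) : Decidable (Pre_calcule_ops n) := by unfold Pre_calcule_ops; infer_instance
def pvWitness_calcule_ops : Int := 6

def Spec_calcule_ops (n : Int) (out : Int × Int) : Prop := out = calcule_ops_alt n
instance (n : Int) (out : Int × Int) : Decidable (Spec_calcule_ops n out) := by unfold Spec_calcule_ops; infer_instance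

-- ===== CLAIM (what is proved, stated in full; the proofs are below) =====
def Claim_equal_calcule_ops : Prop := ∀ (n : Int), Dom_calcule_ops n → Pre_calcule_ops n → Spec_calcule_ops n (calcule_ops n)

-- ===== LEMMAS AND PROOFS =====

theorem pvPopcount_step (m : Nat) (h : 1 ≤ m) : pvPopcount m = m % 2 + pvPopcount (m / 2) := by
  cases m with
  | zero => omega
  | succ k => rw [pvPopcount]

theorem pvLog2_odd (m : Nat) (h3 : 3 ≤ m) (hodd : m % 2 = 1) : Nat.log2 (m - 1) = Nat.log2 m := by
  have hm1 : m - 1 ≠ 0 := by omega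
  have hm : m ≠ 0 := by omega
  apply Nat.le_antisymm
  · rw [Nat.le_log2 hm]
    have h1 : 2 ^ Nat.log2 (m - 1) ≤ m - 1 := (Nat.le_log2 hm1).mp (Nat.le_refl _)
    omega
  · rw [Nat.le_log2 hm1]
    have h1 : 2 ^ Nat.log2 m ≤ m := (Nat.le_log2 hm).mp (Nat.le_refl _)
    have h2 : 1 ≤ Nat.log2 m := (Nat.le_log2 hm).mpr (by omega)
    have h3' : Nat.log2 m = (Nat.log2 m - 1) + 1 := by omega
    have heven : 2 ^ Nat.log2 m % 2 = 0 := by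
      rw [h3', pow_succ]; omega
    omega

theorem pvLog2_half (m : Nat) (h : 2 ≤ m) : Nat.log2 m = Nat.log2 (m / 2) + 1 := by
  rw [Nat.log2_def]
  simp [h]

theorem pvKey (k : Nat) : ∀ n : Int, n.toNat ≤ k → 1 ≤ n → calcule_ops n = calcule_ops_alt n := by
  induction k with
  | zero => intro n hle h1; omega
  | succ k ih =>
    intro n hle h1
    rw [calcule_ops]
    by_cases h1' : n = 1
    · subst h1'
      have hl : Nat.log2 1 = 0 := by rw [Nat.log2_def]; norm_num
      have hp : pvPopcount 1 = 1 := by simp [pvPopcount]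
      norm_num [calcule_ops_alt, pvBitLength, hl, hp]
    · by_cases h2' : n = 2
      · subst h2'
        have hl1 : Nat.log2 1 = 0 := by rw [Nat.log2_def]; norm_num
        have hl2 : Nat.log2 2 = 1 := by rw [Nat.log2_def]; norm_num [hl1]
        have hp : pvPopcount 2 = 1 := by simp [pvPopcount]
        norm_num [calcule_ops_alt, pvBitLength, hl2, hp]
      · have hn3 : 3 ≤ n := by omega
        simp only [if_neg h1', if_neg h2', if_neg (by omega : ¬ n ≤ 0)]
        have hm : n.natAbs = n.toNat := by omega
        by_cases he : n % 2 = 0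
        · -- even case
          simp only [if_pos he]
          have hrec : calcule_ops (n / 2) = calcule_ops_alt (n / 2) := by
            apply ih <;> omega
          rw [hrec]
          have hq : (n / 2).natAbs = n.natAbs / 2 := by omega
          have hbl : pvBitLength n.natAbs = pvBitLength (n.natAbs / 2) + 1 := by
            unfold pvBitLength
            rw [if_neg (by omega), if_neg (by omega), pvLog2_half n.natAbs (by omega)]
          have hpc : pvPopcount n.natAbs = pvPopcount (n.natAbs / 2) := by
            rw [pvPopcount_step n.natAbs (by omega)]
            omega
          simp only [calcule_ops_alt, hq, hbl, hpc]
          simp only [Prod.mk.injEq]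
          constructor <;> push_cast <;> ring
        · -- odd case
          simp only [if_neg he]
          have hrec : calcule_ops (n - 1) = calcule_ops_alt (n - 1) := by
            apply ih <;> omega
          rw [hrec]
          have hq : (n - 1).natAbs = n.natAbs - 1 := by omega
          have hodd : n.natAbs % 2 = 1 := by omega
          have hbl : pvBitLength (n.natAbs - 1) = pvBitLength n.natAbs := by
            unfold pvBitLength
            rw [if_neg (by omega), if_neg (by omega), pvLog2_odd n.natAbs (by omega) hodd]
          have hpc : pvPopcount n.natAbs = pvPopcount (n.natAbs - 1) + 1 := by
            rw [pvPopcount_step n.natAbs (by omega), pvPopcount_step (n.natAbs - 1) (by omega)]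
            have h2 : (n.natAbs - 1) / 2 = n.natAbs / 2 := by omega
            rw [h2]
            omega
          simp only [calcule_ops_alt, hq, hbl, hpc]
          simp only [Prod.mk.injEq]
          constructor <;> push_cast <;> ring

-- ===== VERDICT (by name: the statement is the Claim_ definition above) =====
theorem calcule_ops_spec : Claim_equal_calcule_ops := by
  intro n _ hpre
  exact pvKey n.toNat n (Nat.le_refl _) hpre
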